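-- pv_equiv track=rewrite | github.com/pedropacheco95/padelleague | padel_league/modules/frontend_api/v1/player_comparison.py | compute_head_to_head_totals
-- ===== SOURCE A (Python) =====
-- def compute_head_to_head_totals(all_head_to_head):
--     p1_wins = len([item for item in all_head_to_head if item.get("winner") == "p1"])
--     p2_wins = len([item for item in all_head_to_head if item.get("winner") == "p2"])
--     draws = len([item for item in all_head_to_head if item.get("winner") == "draw"])
--     return {
--         "total": len(all_head_to_head),
--         "p1Wins": p1_wins,
--         "p2Wins": p2_wins,
--         "draws": draws,
--         "p1Losses": p2_wins,
--         "p2Losses": p1_wins,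
--     }
-- ===== SOURCE B (Python) =====
-- def compute_head_to_head_totals(all_head_to_head):
--     winners = [item.get("winner") for item in all_head_to_head]
--     counts = {}
--     for w in winners:
--         counts[w] = counts.get(w, 0) + 1
--     p1_wins = counts.get("p1", 0)
--     p2_wins = counts.get("p2", 0)
--     draws = counts.get("draw", 0)
--     return {
--         "total": len(all_head_to_head),
--         "p1Wins": p1_wins,
--         "p2Wins": p2_wins,
--         "draws": draws,
--         "p1Losses": p2_wins,
--         "p2Losses": p1_wins,
--     }
-- ===== Notes on version B (the rewrite author's own statement) =====
-- stated objective: idiomatic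
-- what changed: Replaces A's three separate filtering scans of the list with a single-pass dictionary tally of winner values, from which the three counts are then looked up.
import Mathlib
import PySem

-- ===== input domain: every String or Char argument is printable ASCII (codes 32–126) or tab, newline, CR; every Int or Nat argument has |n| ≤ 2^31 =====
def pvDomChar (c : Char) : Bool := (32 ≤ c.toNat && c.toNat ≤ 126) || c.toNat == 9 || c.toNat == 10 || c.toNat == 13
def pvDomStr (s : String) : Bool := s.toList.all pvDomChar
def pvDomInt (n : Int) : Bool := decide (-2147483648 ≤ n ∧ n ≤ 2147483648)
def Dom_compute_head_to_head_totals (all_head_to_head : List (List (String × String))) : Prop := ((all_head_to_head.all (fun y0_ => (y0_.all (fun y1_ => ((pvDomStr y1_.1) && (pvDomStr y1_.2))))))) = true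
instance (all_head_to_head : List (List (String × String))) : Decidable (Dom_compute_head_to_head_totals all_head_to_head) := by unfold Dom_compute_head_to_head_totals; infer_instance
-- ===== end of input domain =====

-- B replaces A's three filtering scans with one single-pass dictionary tally of winner values (idiomatic; same return value).

-- ===== PORT A =====
def compute_head_to_head_totals (all_head_to_head : List (List (String × String))) : List (String × Int) :=
  let p1_wins : Int := ((all_head_to_head.filter (fun item => (PySem.Dict.mk item).get? "winner" == some "p1")).length : Int)
  let p2_wins : Int := ((all_head_to_head.filter (fun item => (PySem.Dict.mk item).get? "winner" == some "p2")).length : Int)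
  let draws : Int := ((all_head_to_head.filter (fun item => (PySem.Dict.mk item).get? "winner" == some "draw")).length : Int)
  [("total", (all_head_to_head.length : Int)),
   ("p1Wins", p1_wins),
   ("p2Wins", p2_wins),
   ("draws", draws),
   ("p1Losses", p2_wins),
   ("p2Losses", p1_wins)]

-- ===== PORT B =====
def compute_head_to_head_totals_alt (all_head_to_head : List (List (String × String))) : List (String × Int) :=
  let winners : List (Option String) := all_head_to_head.map (fun item => (PySem.Dict.mk item).get? "winner")
  let counts : PySem.Dict (Option String) Int :=
    winners.foldl (fun d w => d.insert w (d.getD w 0 + 1)) PySem.Dict.empty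
  let p1_wins : Int := counts.getD (some "p1") 0
  let p2_wins : Int := counts.getD (some "p2") 0
  let draws : Int := counts.getD (some "draw") 0
  [("total", (all_head_to_head.length : Int)),
   ("p1Wins", p1_wins),
   ("p2Wins", p2_wins),
   ("draws", draws),
   ("p1Losses", p2_wins),
   ("p2Losses", p1_wins)]

-- ===== PRECONDITION & SPEC =====
def Spec_compute_head_to_head_totals (all_head_to_head : List (List (String × String))) (out : List (String × Int)) : Prop := out = compute_head_to_head_totals_alt all_head_to_head
instance (all_head_to_head : List (List (String × String))) (out : List (String × Int)) : Decidable (Spec_compute_head_to_head_totals all_head_to_head out) := by unfold Spec_compute_head_to_head_totals; infer_instance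

-- ===== CLAIM (what is proved, stated in full; the proofs are below) =====
def Claim_equal_compute_head_to_head_totals : Prop := ∀ (all_head_to_head : List (List (String × String))), Dom_compute_head_to_head_totals all_head_to_head → Spec_compute_head_to_head_totals all_head_to_head (compute_head_to_head_totals all_head_to_head)

-- ===== LEMMAS AND PROOFS =====

-- B's tally at key w equals the length of A's filter for w.
theorem tally_eq_filter_length (l : List (List (String × String))) (w : Option String) :
    ((l.map (fun item => (PySem.Dict.mk item).get? "winner")).foldl
        (fun d x => d.insert x (d.getD x 0 + 1)) PySem.Dict.empty).getD w 0
      = ((l.filter (fun item => (PySem.Dict.mk item).get? "winner" == w)).length : Int) := by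
  rw [PySem.Dict.getD_foldl_insert_add_one, PySem.Dict.getD_empty]
  rw [List.count_eq_countP]
  rw [show (fun (x : Option String) => x == w) = (· == w) from rfl]
  rw [List.countP_map]
  rw [← List.countP_eq_length_filter]
  simp [Function.comp_def]

-- ===== VERDICT (by name: the statement is the Claim_ definition above) =====
theorem compute_head_to_head_totals_spec : Claim_equal_compute_head_to_head_totals := by
  intro l _
  show compute_head_to_head_totals l = compute_head_to_head_totals_alt l
  simp only [compute_head_to_head_totals, compute_head_to_head_totals_alt,
    tally_eq_filter_length]
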